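-- pv_equiv track=rewrite | github.com/guejohn/Unicamp | tarefa09/compras.py | verifica_disponibilidade
-- ===== SOURCE A (Python) =====
-- def verifica_disponibilidade(itens_demandados, itens_disponiveis):
--     """
--     Verifica, para cada elemento de 'itens_demandados', se há um elemento igual disponível em 'itens_disponiveis' (sem haver repetição de correspondência).
--     Se não houver, adiciona o elemento à lista 'lista_nao_compraveis'
--
--     Parâmetros: listas de números 'itens_demandados' e 'itens_disponiveis'
--     Retorna: lista 'lista_nao_compraveis'
--     """
--     lista_nao_compraveis = []
--
--     anterior = -1
--
--     for i in range(len(itens_demandados)):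
--
--         if anterior == len(itens_disponiveis)-1:
--             lista_nao_compraveis.append(itens_demandados[i])
--
--         else:
--
--             for k in range(anterior+1,len(itens_disponiveis)):
--
--
--                 if itens_demandados[i] == itens_disponiveis[k]:
--                     anterior = k
--                     break
--
--
--                 elif itens_demandados[i] < itens_disponiveis[k]:
--                     lista_nao_compraveis.append(itens_demandados[i])
--                     break
--
--
--                 elif (k == len(itens_disponiveis)-1):
--                     lista_nao_compraveis.append(itens_demandados[i])
--                     break
--
--     return lista_nao_compraveis
-- ===== SOURCE B (Python) =====
-- def verifica_disponibilidade(itens_demandados, itens_disponiveis):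
--     # Stack of available items: top of the stack is the next item still on offer.
--     pilha = itens_disponiveis[::-1]
--     nao_compraveis = []
--     for d in itens_demandados:
--         i = len(pilha)
--         while i > 0 and pilha[i - 1] < d:   # skip offers smaller than d
--             i -= 1
--         if i > 0 and pilha[i - 1] == d:
--             del pilha[i - 1:]               # consume up to and including the match
--         else:
--             nao_compraveis.append(d)        # no exact match reachable
--     return nao_compraveis
-- ===== Notes on version B (the rewrite author's own statement) =====
-- stated objective: alternative
-- what changed: Replaces A's mutable 'anterior' index plus a nested range loop with three break branches by a stack of the still-available items (the input reversed), where skipping smaller offers scans down from the top and a match consumes the scanned prefix by a single deletion from the stack's end.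
import Mathlib
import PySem

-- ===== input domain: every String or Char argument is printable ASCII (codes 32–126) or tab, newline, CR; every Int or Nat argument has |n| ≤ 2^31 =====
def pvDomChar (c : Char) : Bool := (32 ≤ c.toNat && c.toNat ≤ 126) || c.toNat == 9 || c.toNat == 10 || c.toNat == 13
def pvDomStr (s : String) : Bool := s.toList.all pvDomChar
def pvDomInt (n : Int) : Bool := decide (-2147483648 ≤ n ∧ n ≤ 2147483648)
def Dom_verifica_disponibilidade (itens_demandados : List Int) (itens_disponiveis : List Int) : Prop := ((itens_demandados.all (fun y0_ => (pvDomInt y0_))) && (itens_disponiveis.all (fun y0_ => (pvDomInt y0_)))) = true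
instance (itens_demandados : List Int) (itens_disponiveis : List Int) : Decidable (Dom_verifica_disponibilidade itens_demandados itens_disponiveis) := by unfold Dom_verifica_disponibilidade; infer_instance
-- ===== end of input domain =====

-- B replaces A's index bookkeeping ('anterior' plus a nested range loop with three break
-- branches) by a stack of the still-available items (the reversed list), consuming the
-- scanned prefix on a match by deleting from the stack's end; objective: alternative.

-- ===== PORT A =====
-- inner 'for k in range(anterior+1, len(disp))' loop of A; returns some k if a match
-- happened at index k (A sets anterior = k), none if the item was appended as unavailable.
def pvInnerA (d : Int) (disp : List Int) (k : Nat) : Option Nat :=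
  if h : k < disp.length then
    if d == disp[k] then some k
    else if d < disp[k] then none
    else if k == disp.length - 1 then none
    else pvInnerA d disp (k + 1)
  else none
termination_by disp.length - k

-- outer 'for i in range(len(itens_demandados))' loop of A, with state 'anterior'
def pvOuterA (disp : List Int) : List Int → Int → List Int
  | [], _ => []
  | d :: ds, anterior =>
    if anterior == (disp.length : Int) - 1 then d :: pvOuterA disp ds anterior
    else
      match pvInnerA d disp (anterior + 1).toNat with
      | some k => pvOuterA disp ds (k : Int)
      | none => d :: pvOuterA disp ds anterior

def verifica_disponibilidade (itens_demandados : List Int) (itens_disponiveis : List Int) : List Int :=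
  pvOuterA itens_disponiveis itens_demandados (-1)

-- ===== PORT B =====
-- the 'while i > 0 and pilha[i-1] < d: i -= 1' loop of Source B
-- (getD's index is in range whenever i ≤ pilha.length, which holds at every call)
def pvSkip (d : Int) (pilha : List Int) (i : Nat) : Nat :=
  if h : 0 < i then
    if pilha.getD (i - 1) 0 < d then pvSkip d pilha (i - 1) else i
  else i
termination_by i

-- the 'for d in itens_demandados' loop of Source B over the stack 'pilha' (top at the end);
-- 'del pilha[i-1:]' is 'pilha.take (i-1)'
def pvAltGoB : List Int → List Int → List Int
  | [], _ => []
  | d :: ds, pilha =>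
    if 0 < pvSkip d pilha pilha.length ∧ pilha.getD (pvSkip d pilha pilha.length - 1) 0 = d then
      pvAltGoB ds (pilha.take (pvSkip d pilha pilha.length - 1))
    else d :: pvAltGoB ds pilha

def verifica_disponibilidade_alt (itens_demandados : List Int) (itens_disponiveis : List Int) : List Int :=
  pvAltGoB itens_demandados itens_disponiveis.reverse

-- ===== PRECONDITION & SPEC =====
def Spec_verifica_disponibilidade (itens_demandados : List Int) (itens_disponiveis : List Int) (out : List Int) : Prop := out = verifica_disponibilidade_alt itens_demandados itens_disponiveis
instance (itens_demandados : List Int) (itens_disponiveis : List Int) (out : List Int) : Decidable (Spec_verifica_disponibilidade itens_demandados itens_disponiveis out) := by unfold Spec_verifica_disponibilidade; infer_instance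

-- ===== CLAIM (what is proved, stated in full; the proofs are below) =====
def Claim_equal_verifica_disponibilidade : Prop := ∀ (itens_demandados : List Int) (itens_disponiveis : List Int), Dom_verifica_disponibilidade itens_demandados itens_disponiveis → Spec_verifica_disponibilidade itens_demandados itens_disponiveis (verifica_disponibilidade itens_demandados itens_disponiveis)

-- ===== LEMMAS AND PROOFS =====

-- Proof-side model of one step of both programs: take the suffix after the first
-- element ≥ d when that element equals d (a match), else fail.
def pvTryTake (d : Int) : List Int → Option (List Int)
  | [] => none
  | x :: xs => if x == d then some xs else if d < x then none else pvTryTake d xs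

def pvAltGo : List Int → List Int → List Int
  | [], _ => []
  | d :: ds, rest =>
    match pvTryTake d rest with
    | some r => pvAltGo ds r
    | none => d :: pvAltGo ds rest

theorem pvSkip_le (d : Int) (pilha : List Int) : ∀ i, pvSkip d pilha i ≤ i := by
  intro i
  induction i with
  | zero => unfold pvSkip; simp
  | succ n ih =>
    unfold pvSkip
    simp only [Nat.succ_sub_one]
    split
    · split
      · omega
      · omega
    · omega

theorem pvSkip_append (d x : Int) (r : List Int) :
    ∀ i, i ≤ r.length → pvSkip d (r ++ [x]) i = pvSkip d r i := by
  intro i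
  induction i with
  | zero => intro _; unfold pvSkip; simp
  | succ n ih =>
    intro hn
    have hg : (r ++ [x]).getD n 0 = r.getD n 0 := by
      simp [List.getD, List.getElem?_append_left (by omega : n < r.length)]
    unfold pvSkip
    simp only [Nat.succ_sub_one, hg]
    split
    · split
      · exact ih (by omega)
      · rfl
    · rfl

-- one step of B on the reversed list equals pvTryTake (result reversed)
theorem pvStep_eq (d : Int) (rest : List Int) :
    (if 0 < pvSkip d rest.reverse rest.reverse.length ∧
        rest.reverse.getD (pvSkip d rest.reverse rest.reverse.length - 1) 0 = d then
       some (rest.reverse.take (pvSkip d rest.reverse rest.reverse.length - 1))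
     else none)
    = (pvTryTake d rest).map (fun s => s.reverse) := by
  induction rest with
  | nil => unfold pvSkip; simp [pvTryTake]
  | cons x xs ih =>
    have hrev : (x :: xs).reverse = xs.reverse ++ [x] := by simp
    have hlen : (x :: xs).reverse.length = xs.length + 1 := by simp
    have hgtop : ((x :: xs).reverse).getD xs.length 0 = x := by
      rw [hrev]
      simp [List.getD, show xs.reverse.length = xs.length from by simp]
    have hskip1 : pvSkip d (x :: xs).reverse ((x :: xs).reverse.length)
        = if x < d then pvSkip d (x :: xs).reverse xs.length else xs.length + 1 := by
      conv_lhs => rw [pvSkip.eq_def]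
      rw [hlen]
      simp only [Nat.succ_sub_one]
      have h0 : 0 < xs.length + 1 := by omega
      rw [dif_pos h0]
      rw [show (x :: xs).reverse.getD xs.length 0 = x from hgtop]
    by_cases hxd : x = d
    · have hnlt : ¬ (x < d) := by omega
      rw [hskip1, if_neg hnlt]
      have hc : 0 < xs.length + 1 ∧ ((x :: xs).reverse).getD (xs.length + 1 - 1) 0 = d := by
        refine ⟨by omega, ?_⟩
        simp only [Nat.add_sub_cancel]
        rw [hgtop]
        exact hxd
      rw [if_pos hc]
      have htake : ((x :: xs).reverse).take (xs.length + 1 - 1) = xs.reverse := by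
        rw [hrev]
        simp
      rw [htake]
      have : pvTryTake d (x :: xs) = some xs := by
        simp [pvTryTake, hxd]
      rw [this]
      rfl
    · by_cases hdx : d < x
      · have hnlt : ¬ (x < d) := by omega
        rw [hskip1, if_neg hnlt]
        have hne : ¬ (0 < xs.length + 1 ∧ ((x :: xs).reverse).getD (xs.length + 1 - 1) 0 = d) := by
          intro hcon
          have := hcon.2
          rw [show xs.length + 1 - 1 = xs.length from rfl, hgtop] at this
          exact hxd this
        rw [if_neg hne]
        have : pvTryTake d (x :: xs) = none := by
          have h1 : ¬ (x == d) = true := by simp [hxd]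
          simp [pvTryTake, h1, hdx]
        rw [this]
        rfl
      · -- x < d : skip
        have hlt : x < d := by omega
        rw [hskip1, if_pos hlt]
        have hsk : pvSkip d (x :: xs).reverse xs.length = pvSkip d xs.reverse xs.length := by
          rw [hrev]
          exact pvSkip_append d x xs.reverse xs.length (by simp)
        have hle : pvSkip d xs.reverse xs.length ≤ xs.length := pvSkip_le d xs.reverse xs.length
        have hlenr : xs.reverse.length = xs.length := by simp
        have htt : pvTryTake d (x :: xs) = pvTryTake d xs := by
          have h1 : ¬ (x == d) = true := by simp [hxd]
          simp [pvTryTake, h1, hdx]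
        rw [hsk, htt]
        rw [hlenr] at ih
        rcases Nat.eq_zero_or_pos (pvSkip d xs.reverse xs.length) with hz | hp
        · rw [hz] at ih ⊢
          simpa using ih
        · have hidx : pvSkip d xs.reverse xs.length - 1 < xs.length := by omega
          have hidx' : pvSkip d xs.reverse xs.length - 1 < xs.reverse.length := by
            simpa using hidx
          have hg2 : ((x :: xs).reverse).getD (pvSkip d xs.reverse xs.length - 1) 0
              = xs.reverse.getD (pvSkip d xs.reverse xs.length - 1) 0 := by
            rw [hrev]
            simp only [List.getD]
            rw [List.getElem?_append_left hidx']
          have ht2 : ((x :: xs).reverse).take (pvSkip d xs.reverse xs.length - 1)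
              = xs.reverse.take (pvSkip d xs.reverse xs.length - 1) := by
            rw [hrev]
            exact List.take_append_of_le_length (by simpa using hidx.le)
          rw [hg2, ht2]
          exact ih

theorem pvAltGoB_altGo : ∀ (dem rest : List Int), pvAltGoB dem rest.reverse = pvAltGo dem rest := by
  intro dem
  induction dem with
  | nil => intro rest; simp [pvAltGoB, pvAltGo]
  | cons d ds ih =>
    intro rest
    have hstep := pvStep_eq d rest
    cases htt : pvTryTake d rest with
    | none =>
      rw [htt] at hstep
      simp only [Option.map_none] at hstep
      have hne : ¬ (0 < pvSkip d rest.reverse rest.reverse.length ∧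
          rest.reverse.getD (pvSkip d rest.reverse rest.reverse.length - 1) 0 = d) := by
        intro hc
        rw [if_pos hc] at hstep
        exact Option.some_ne_none _ hstep
      simp only [pvAltGoB, pvAltGo, htt, hne, if_neg, not_false_iff]
      rw [ih rest]
    | some s =>
      rw [htt] at hstep
      simp only [Option.map_some] at hstep
      by_cases hc : 0 < pvSkip d rest.reverse rest.reverse.length ∧
          rest.reverse.getD (pvSkip d rest.reverse rest.reverse.length - 1) 0 = d
      · rw [if_pos hc] at hstep
        have htake := Option.some.inj hstep
        simp only [pvAltGoB, pvAltGo, htt, hc, htake]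
        exact ih s
      · rw [if_neg hc] at hstep
        exact absurd hstep.symm (Option.some_ne_none _)

-- A's inner scan from index j computes the same verdict as B's pvTryTake on the suffix drop j:
-- either both fail, or A yields a match index k with B yielding the suffix after k.
theorem pvInner_tryTake (d : Int) (disp : List Int) :
    ∀ j, j ≤ disp.length →
      (pvInnerA d disp j = none ∧ pvTryTake d (disp.drop j) = none) ∨
      (∃ k, pvInnerA d disp j = some k ∧ j ≤ k ∧ k < disp.length ∧
            pvTryTake d (disp.drop j) = some (disp.drop (k + 1))) := by
  intro j hj
  induction hn : disp.length - j generalizing j with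
  | zero =>
    have hje : j = disp.length := by omega
    subst hje
    left
    constructor
    · unfold pvInnerA; simp
    · simp [pvTryTake]
  | succ n ih =>
    have hjl : j < disp.length := by omega
    have hdrop : disp.drop j = disp[j] :: disp.drop (j + 1) :=
      List.drop_eq_getElem_cons hjl
    by_cases he : d = disp[j]
    · right
      refine ⟨j, ?_, le_refl _, hjl, ?_⟩
      · unfold pvInnerA; simp [hjl, he]
      · rw [hdrop]; simp [pvTryTake, he.symm]
    · by_cases hlt : d < disp[j]
      · left
        constructor
        · unfold pvInnerA
          simp only [hjl, dif_pos]
          have : ¬ (d == disp[j]) = true := by simp [he]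
          simp [this, hlt]
        · rw [hdrop]
          have hne : ¬ (disp[j] == d) = true := by simp [Ne.symm he]
          simp [pvTryTake, hne, hlt]
      · -- disp[j] < d: both skip this element
        have e1 : (d == disp[j]) = false := by simp [he]
        have hstep : pvInnerA d disp j = pvInnerA d disp (j + 1) := by
          by_cases hlast : j = disp.length - 1
          · have h1 : pvInnerA d disp (j + 1) = none := by
              unfold pvInnerA
              have : ¬ (j + 1 < disp.length) := by omega
              simp [this]
            have e3 : (j == disp.length - 1) = true := by simp [hlast]
            have h0 : pvInnerA d disp j = none := by
              unfold pvInnerA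
              simp [hjl, e1, hlt, e3]
            rw [h0, h1]
          · have e3 : (j == disp.length - 1) = false := by simp [hlast]
            unfold pvInnerA
            simp only [hjl, dif_pos, e1, e3, Bool.false_eq_true, if_false, hlt]
            conv_lhs => rw [pvInnerA.eq_def]
        have htstep : pvTryTake d (disp.drop j) = pvTryTake d (disp.drop (j + 1)) := by
          rw [hdrop]
          have hne : ¬ (disp[j] == d) = true := by simp [Ne.symm he]
          simp [pvTryTake, hne, hlt]
        have ihres := ih (j + 1) (by omega) (by omega)
        rcases ihres with ⟨h1, h2⟩ | ⟨k, h1, h2, h3, h4⟩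
        · left; exact ⟨by rw [hstep]; exact h1, by rw [htstep]; exact h2⟩
        · right; exact ⟨k, by rw [hstep]; exact h1, by omega, h3, by rw [htstep]; exact h4⟩

-- Main loop correspondence: A's state 'anterior' = (j : Int) - 1 ↔ B's state 'rest' = disp.drop j.
theorem pvOuter_altGo (disp : List Int) :
    ∀ dem (j : Nat), j ≤ disp.length →
      pvOuterA disp dem ((j : Int) - 1) = pvAltGo dem (disp.drop j) := by
  intro dem
  induction dem with
  | nil => intro j hj; simp [pvOuterA, pvAltGo]
  | cons d ds ih =>
    intro j hj
    by_cases hje : j = disp.length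
    · subst hje
      have hg : ((disp.length : Int) - 1 == (disp.length : Int) - 1) = true := by simp
      simp only [pvOuterA, hg, if_pos]
      have : disp.drop disp.length = [] := by simp
      rw [this]
      simp only [pvAltGo, pvTryTake]
      rw [ih disp.length (le_refl _), this]
    · have hjl : j < disp.length := by omega
      have hg : (((j : Int) - 1) == (disp.length : Int) - 1) = false := by
        simp; omega
      have htn : ((j : Int) - 1 + 1).toNat = j := by omega
      rcases pvInner_tryTake d disp j hjl.le with ⟨h1, h2⟩ | ⟨k, h1, h2, h3, h4⟩
      · simp only [pvOuterA, hg, Bool.false_eq_true, if_false, htn, h1]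
        simp only [pvAltGo, h2]
        rw [ih j hj]
      · simp only [pvOuterA, hg, Bool.false_eq_true, if_false, htn, h1]
        simp only [pvAltGo, h4]
        have := ih (k + 1) (by omega)
        have hk : ((k : Int)) = ((k + 1 : Nat) : Int) - 1 := by push_cast; ring
        rw [hk, this]

-- ===== VERDICT (by name: the statement is the Claim_ definition above) =====
theorem verifica_disponibilidade_spec : Claim_equal_verifica_disponibilidade := by
  intro dem disp _
  unfold Spec_verifica_disponibilidade verifica_disponibilidade verifica_disponibilidade_alt
  rw [pvAltGoB_altGo dem disp]
  have := pvOuter_altGo disp dem 0 (Nat.zero_le _)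
  simpa using this
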